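-- pv_equiv track=rewrite | github.com/symin07/Algorithm | Week6/Greedy-min_Lateness.py | min_Lateness
-- ===== SOURCE A (Python) =====
-- from operator import itemgetter
--
-- def min_Lateness(assignments):
--
--     sortedAssignments = sorted(assignments, key=itemgetter(2))
--
--     maxLateness = 0
--     startTime = 0
--     schedule = []
--
--     for assignment in sortedAssignments:
--         finishTime = startTime + assignment[1]
--
--         if(finishTime > assignment[2]):
--             maxLateness = max(maxLateness, (finishTime - assignment[2]))
--         startTime = finishTime
--         schedule.append(assignment[0])
--
--     return maxLateness, schedule
-- ===== SOURCE B (Python) =====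
-- from operator import itemgetter
--
-- def min_Lateness(assignments):
--     ordered = sorted(assignments, key=itemgetter(2))
--     remaining = sum(a[1] for a in ordered)
--     worst = 0
--     names = []
--     for name, dur, deadline in reversed(ordered):
--         if remaining - deadline > worst:
--             worst = remaining - deadline
--         remaining -= dur
--         names.append(name)
--     names.reverse()
--     return worst, names
-- ===== Notes on version B (the rewrite author's own statement) =====
-- stated objective: alternative
-- what changed: Instead of A's forward pass with a running start time, B sums all durations once and walks the deadline-sorted list BACKWARDS, counting the total down: at each job the current countdown value is exactly that job's finish time, so worst lateness is accumulated in reverse and the schedule is built back-to-front and reversed.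
import Mathlib
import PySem

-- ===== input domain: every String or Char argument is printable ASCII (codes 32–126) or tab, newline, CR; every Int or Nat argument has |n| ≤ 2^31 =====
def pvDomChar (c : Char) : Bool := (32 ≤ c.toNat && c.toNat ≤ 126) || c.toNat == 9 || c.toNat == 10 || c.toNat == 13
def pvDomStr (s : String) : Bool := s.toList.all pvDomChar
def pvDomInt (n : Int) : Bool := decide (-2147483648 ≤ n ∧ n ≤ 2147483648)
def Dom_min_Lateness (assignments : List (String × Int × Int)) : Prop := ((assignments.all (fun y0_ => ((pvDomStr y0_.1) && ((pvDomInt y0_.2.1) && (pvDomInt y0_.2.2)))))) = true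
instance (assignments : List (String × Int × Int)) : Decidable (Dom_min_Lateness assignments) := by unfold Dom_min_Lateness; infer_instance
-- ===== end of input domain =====

-- B replaces A's forward pass with a running start time by a backward walk over the
-- deadline-sorted list that counts the precomputed total duration down (alternative
-- decomposition, same asymptotic cost).


-- ===== PORT A =====
-- the for-loop of A over (maxLateness, startTime, schedule)
def pvALoop : List (String × Int × Int) → Int → Int → List String → Int × List String
  | [], m, _, sch => (m, sch)
  | a :: rest, m, s, sch =>
      let f := s + a.2.1
      pvALoop rest (if f > a.2.2 then max m (f - a.2.2) else m) f (sch ++ [a.1])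

def min_Lateness (assignments : List (String × Int × Int)) : Int × List String :=
  pvALoop (PySem.List.sorted assignments (fun a => a.2.2)) 0 0 []

-- ===== PORT B =====
-- the backward for-loop of B over (worst, remaining, names)
def pvBLoop : List (String × Int × Int) → Int → Int → List String → Int × List String
  | [], w, _, ns => (w, ns)
  | a :: rest, w, r, ns =>
      pvBLoop rest (if r - a.2.2 > w then r - a.2.2 else w) (r - a.2.1) (ns ++ [a.1])

def min_Lateness_alt (assignments : List (String × Int × Int)) : Int × List String :=
  let ordered := PySem.List.sorted assignments (fun a => a.2.2)
  let remaining := (ordered.map (fun a => a.2.1)).sum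
  let res := pvBLoop ordered.reverse 0 remaining []
  (res.1, res.2.reverse)

-- ===== PRECONDITION & SPEC =====
def Spec_min_Lateness (assignments : List (String × Int × Int)) (out : Int × List String) : Prop := out = min_Lateness_alt assignments
instance (assignments : List (String × Int × Int)) (out : Int × List String) : Decidable (Spec_min_Lateness assignments out) := by unfold Spec_min_Lateness; infer_instance

-- ===== CLAIM (what is proved, stated in full; the proofs are below) =====
def Claim_equal_min_Lateness : Prop := ∀ (assignments : List (String × Int × Int)), Dom_min_Lateness assignments → Spec_min_Lateness assignments (min_Lateness assignments)

-- ===== LEMMAS AND PROOFS =====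

-- lateness values of a list of jobs, run from start time s (forward order)
def pvLatList (s : Int) : List (String × Int × Int) → List Int
  | [] => []
  | a :: rest => (s + a.2.1 - a.2.2) :: pvLatList (s + a.2.1) rest

-- lateness values read off B's countdown: r is the finish time of the first job
def pvRevLats (r : Int) : List (String × Int × Int) → List Int
  | [] => []
  | a :: rest => (r - a.2.2) :: pvRevLats (r - a.2.1) rest

def pvSumDur (l : List (String × Int × Int)) : Int := (l.map (fun a => a.2.1)).sum

theorem pvALoop_eq (l : List (String × Int × Int)) :
    ∀ (m s : Int) (sch : List String), 0 ≤ m →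
      pvALoop l m s sch = ((pvLatList s l).foldl max m, sch ++ l.map Prod.fst) := by
  induction l with
  | nil => intro m s sch _; simp [pvALoop, pvLatList]
  | cons a rest ih =>
      intro m s sch hm
      simp only [pvALoop, pvLatList, List.foldl_cons]
      by_cases h : s + a.2.1 > a.2.2
      · rw [if_pos h, ih _ _ _ (le_max_of_le_left hm)]
        simp
      · have : max m (s + a.2.1 - a.2.2) = m := by omega
        rw [if_neg h, ih _ _ _ hm, this]
        simp

theorem pvBLoop_eq (l : List (String × Int × Int)) :
    ∀ (w r : Int) (ns : List String),
      pvBLoop l w r ns = ((pvRevLats r l).foldl max w, ns ++ l.map Prod.fst) := by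
  induction l with
  | nil => intro w r ns; simp [pvBLoop, pvRevLats]
  | cons a rest ih =>
      intro w r ns
      simp only [pvBLoop, pvRevLats, List.foldl_cons]
      have : (if r - a.2.2 > w then r - a.2.2 else w) = max w (r - a.2.2) := by
        split_ifs <;> omega
      rw [this, ih]
      simp

theorem pvRevLats_append (xs ys : List (String × Int × Int)) :
    ∀ r : Int, pvRevLats r (xs ++ ys) = pvRevLats r xs ++ pvRevLats (r - pvSumDur xs) ys := by
  induction xs with
  | nil => intro r; simp [pvRevLats, pvSumDur]
  | cons a rest ih =>
      intro r
      simp only [List.cons_append, pvRevLats, ih, pvSumDur, List.map_cons, List.sum_cons]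
      rw [show r - a.2.1 - (rest.map (fun a => a.2.1)).sum = r - (a.2.1 + (rest.map (fun a => a.2.1)).sum) by ring]

theorem pvRevLats_reverse (l : List (String × Int × Int)) :
    ∀ s : Int, pvRevLats (s + pvSumDur l) l.reverse = (pvLatList s l).reverse := by
  induction l with
  | nil => intro s; simp [pvRevLats, pvLatList]
  | cons a rest ih =>
      intro s
      simp only [List.reverse_cons, pvLatList]
      rw [pvRevLats_append]
      have h1 : s + pvSumDur (a :: rest) = (s + a.2.1) + pvSumDur rest := by
        simp [pvSumDur]; ring
      have h2 : pvSumDur rest.reverse = pvSumDur rest := by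
        simp [pvSumDur]
      rw [h1, ih (s + a.2.1), h2]
      simp [pvRevLats]

theorem pvFoldl_max_shift (t : List Int) : ∀ a b : Int, max a (t.foldl max b) = t.foldl max (max a b) := by
  induction t with
  | nil => intro a b; rfl
  | cons x r ih =>
      intro a b
      simp only [List.foldl_cons]
      rw [ih, max_assoc]

theorem pvFoldl_max_reverse (t : List Int) : ∀ b : Int, t.reverse.foldl max b = t.foldl max b := by
  induction t with
  | nil => intro b; rfl
  | cons x r ih =>
      intro b
      simp only [List.reverse_cons, List.foldl_append, List.foldl_cons, List.foldl_nil, ih]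
      rw [max_comm, pvFoldl_max_shift, max_comm]

-- ===== VERDICT (by name: the statement is the Claim_ definition above) =====
theorem min_Lateness_spec : Claim_equal_min_Lateness := by
  intro assignments _
  unfold Spec_min_Lateness min_Lateness min_Lateness_alt
  rw [pvALoop_eq _ 0 0 [] le_rfl]
  simp only [pvBLoop_eq]
  have h : ((PySem.List.sorted assignments (fun a => a.2.2)).map (fun a => a.2.1)).sum
      = 0 + pvSumDur (PySem.List.sorted assignments (fun a => a.2.2)) := by
    simp [pvSumDur]
  simp only [h, pvRevLats_reverse, pvFoldl_max_reverse]
  simp
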